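-- pv_equiv track=rewrite | github.com/anni990/Green-Sathi-Deploy | models/fetch_weather.py | get_hourly_weather_codes
-- ===== SOURCE A (Python) =====
-- def get_hourly_weather_codes(hourly_data, full_data):
--     """Generate weather codes for hourly data"""
--     # This is a simplification as the hourly data might not include weather codes
--     # We'll use the daily weather code for all hours of that day
--     if 'daily' in full_data and 'weathercode' in full_data['daily']:
--         daily_codes = full_data['daily']['weathercode']
--         hours_per_day = 24
--
--         result = []
--         for i in range(len(hourly_data.get('time', []))):
--             day_index = i // hours_per_day
--             if day_index < len(daily_codes):
--                 result.append(daily_codes[day_index])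
--             else:
--                 result.append(0)  # Default clear sky
--         return result
--
--     return [0] * len(hourly_data.get('time', []))  # Default all to clear sky
-- ===== SOURCE B (Python) =====
-- def get_hourly_weather_codes(hourly_data, full_data):
--     """Generate weather codes for hourly data (day-major repetition)."""
--     n = len(hourly_data.get('time', []))
--     daily = full_data.get('daily')
--     if daily is None or 'weathercode' not in daily:
--         return [0] * n
--     out = []
--     remaining = n
--     for code in daily['weathercode']:
--         if remaining == 0:
--             break
--         take = min(24, remaining)
--         out.extend([code] * take)
--         remaining -= take
--     out.extend([0] * remaining)
--     return out
-- ===== Notes on version B (the rewrite author's own statement) =====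
-- stated objective: alternative
-- what changed: B iterates over the daily codes, emitting min(24, remaining-hours) copies of each and zero-padding the tail, instead of A's per-hour loop computing i//24 and bounds-checking for every hour.
import Mathlib
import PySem

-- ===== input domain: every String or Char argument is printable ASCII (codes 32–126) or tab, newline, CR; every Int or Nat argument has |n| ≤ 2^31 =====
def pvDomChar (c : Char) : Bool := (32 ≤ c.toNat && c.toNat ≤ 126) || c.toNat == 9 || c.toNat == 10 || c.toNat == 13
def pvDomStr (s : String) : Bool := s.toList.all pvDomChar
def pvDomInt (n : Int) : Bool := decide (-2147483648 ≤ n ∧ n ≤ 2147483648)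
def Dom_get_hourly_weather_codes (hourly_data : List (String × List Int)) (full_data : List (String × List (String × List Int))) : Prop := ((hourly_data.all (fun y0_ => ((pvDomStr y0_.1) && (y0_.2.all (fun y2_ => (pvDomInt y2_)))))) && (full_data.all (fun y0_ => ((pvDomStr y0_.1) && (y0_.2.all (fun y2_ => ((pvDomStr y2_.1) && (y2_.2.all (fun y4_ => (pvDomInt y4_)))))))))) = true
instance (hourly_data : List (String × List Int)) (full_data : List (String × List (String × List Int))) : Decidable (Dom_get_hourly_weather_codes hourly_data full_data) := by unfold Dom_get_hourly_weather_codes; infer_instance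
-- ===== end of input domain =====

-- B assigns each hour the code of its day by repeating each daily code day-by-day
-- (min(24, remaining) copies, then zero-padding), instead of A's per-hour loop
-- computing i // 24 and bounds-checking for every hour; same cost, different traversal.

-- ===== PORT A =====
def get_hourly_weather_codes (hourly_data : List (String × List Int)) (full_data : List (String × List (String × List Int))) : List Int :=
  match full_data.lookup "daily" with
  | some daily =>
    match daily.lookup "weathercode" with
    | some daily_codes =>
      let n : Int := ((hourly_data.lookup "time").getD []).length
      (PySem.List.pyRange 0 n 1).foldl (fun result i =>
        let day_index := PySem.Int.floordiv i 24
        if day_index < (daily_codes.length : Int) then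
          result ++ [PySem.List.pyGetD daily_codes day_index 0]
        else
          result ++ [0]) []
    | none => List.replicate ((hourly_data.lookup "time").getD []).length 0
  | none => List.replicate ((hourly_data.lookup "time").getD []).length 0

-- ===== PORT B =====
-- the for-loop over daily codes of Source B, with `remaining` as state; the trailing
-- zero-extension is the `[]` base case's replicate
def altFill : List Int → Nat → List Int
  | [], remaining => List.replicate remaining 0
  | c :: cs, remaining =>
    if remaining = 0 then []
    else
      let take := min 24 remaining
      List.replicate take c ++ altFill cs (remaining - take)

def get_hourly_weather_codes_alt (hourly_data : List (String × List Int)) (full_data : List (String × List (String × List Int))) : List Int :=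
  let n := ((hourly_data.lookup "time").getD []).length
  match full_data.lookup "daily" with
  | some daily =>
    match daily.lookup "weathercode" with
    | some codes => altFill codes n
    | none => List.replicate n 0
  | none => List.replicate n 0

-- ===== PRECONDITION & SPEC =====
def Spec_get_hourly_weather_codes (hourly_data : List (String × List Int)) (full_data : List (String × List (String × List Int))) (out : List Int) : Prop := out = get_hourly_weather_codes_alt hourly_data full_data
instance (hourly_data : List (String × List Int)) (full_data : List (String × List (String × List Int))) (out : List Int) : Decidable (Spec_get_hourly_weather_codes hourly_data full_data out) := by unfold Spec_get_hourly_weather_codes; infer_instance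

-- ===== CLAIM (what is proved, stated in full; the proofs are below) =====
def Claim_equal_get_hourly_weather_codes : Prop := ∀ (hourly_data : List (String × List Int)) (full_data : List (String × List (String × List Int))), Dom_get_hourly_weather_codes hourly_data full_data → Spec_get_hourly_weather_codes hourly_data full_data (get_hourly_weather_codes hourly_data full_data)

-- ===== LEMMAS AND PROOFS =====

-- per-hour value that A's loop appends, in Nat form
def hourCode (codes : List Int) (k : Nat) : Int :=
  if k / 24 < codes.length then codes.getD (k / 24) 0 else 0

lemma altFill_zero (codes : List Int) : altFill codes 0 = [] := by
  cases codes <;> simp [altFill]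

lemma hourCode_small {codes : List Int} {c : Int} {k : Nat} (hk : k < 24) :
    hourCode (c :: codes) k = c := by
  simp [hourCode, Nat.div_eq_of_lt hk]

lemma hourCode_shift (c : Int) (codes : List Int) (k : Nat) :
    hourCode (c :: codes) (24 + k) = hourCode codes k := by
  unfold hourCode
  rw [Nat.add_comm 24 k, Nat.add_div_right k (by omega)]
  simp

lemma map_range_hourCode_small (c : Int) (codes : List Int) (n : Nat) (hn : n ≤ 24) :
    (List.range n).map (hourCode (c :: codes)) = List.replicate n c := by
  rw [List.eq_replicate_iff]
  constructor
  · simp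
  · intro b hb
    simp only [List.mem_map, List.mem_range] at hb
    obtain ⟨k, hk, rfl⟩ := hb
    exact hourCode_small (by omega)

lemma altFill_eq_map_range (codes : List Int) (n : Nat) :
    altFill codes n = (List.range n).map (hourCode codes) := by
  induction codes generalizing n with
  | nil =>
    simp only [altFill]
    symm
    rw [List.eq_replicate_iff]
    refine ⟨by simp, ?_⟩
    intro b hb
    simp only [List.mem_map, List.mem_range] at hb
    obtain ⟨k, hk, rfl⟩ := hb
    simp [hourCode]
  | cons c cs ih =>
    by_cases h0 : n = 0
    · simp [h0, altFill]
    by_cases h24 : n ≤ 24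
    · have : min 24 n = n := by omega
      simp only [altFill, h0, if_false, this, Nat.sub_self, altFill_zero,
        List.append_nil]
      exact (map_range_hourCode_small c cs n h24).symm
    · have hmin : min 24 n = 24 := by omega
      have hsplit : n = 24 + (n - 24) := by omega
      calc altFill (c :: cs) n
          = List.replicate 24 c ++ altFill cs (n - 24) := by
            simp only [altFill, h0, if_false, hmin]
        _ = (List.range 24).map (hourCode (c :: cs)) ++
              ((List.range (n - 24)).map fun k => hourCode (c :: cs) (24 + k)) := by
            rw [ih, map_range_hourCode_small c cs 24 (by omega)]
            congr 1
            exact List.map_congr_left (fun k _ => (hourCode_shift c cs k).symm)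
        _ = (List.range n).map (hourCode (c :: cs)) := by
            conv_rhs => rw [hsplit, List.range_add]
            simp [Function.comp]

lemma loopA_eq_altFill (codes : List Int) (n : Nat) :
    (PySem.List.pyRange 0 (n : Int) 1).foldl (fun result i =>
        if PySem.Int.floordiv i 24 < (codes.length : Int) then
          result ++ [PySem.List.pyGetD codes (PySem.Int.floordiv i 24) 0]
        else
          result ++ [0]) []
      = altFill codes n := by
  have hbody : (fun (result : List Int) (i : Int) =>
      if PySem.Int.floordiv i 24 < (codes.length : Int) then
        result ++ [PySem.List.pyGetD codes (PySem.Int.floordiv i 24) 0]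
      else
        result ++ [0])
      = fun result i => result ++
        [if PySem.Int.floordiv i 24 < (codes.length : Int) then
            PySem.List.pyGetD codes (PySem.Int.floordiv i 24) 0 else 0] := by
    funext result i
    by_cases h : PySem.Int.floordiv i 24 < (codes.length : Int)
    · rw [if_pos h, if_pos h]
    · rw [if_neg h, if_neg h]
  rw [hbody, PySem.List.foldl_append_singleton_eq_map, List.nil_append,
    PySem.List.pyRange_one, altFill_eq_map_range]
  simp only [Int.sub_zero, Int.toNat_natCast, List.map_map]
  apply List.map_congr_left
  intro k _
  have hfd : PySem.Int.floordiv ((0 : Int) + (k : Int)) 24 = ((k / 24 : Nat) : Int) := by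
    rw [Int.zero_add]
    exact_mod_cast PySem.Int.floordiv_natCast k 24
  simp only [Function.comp_apply, hfd, PySem.List.pyGetD_natCast, hourCode]
  by_cases h : k / 24 < codes.length
  · rw [if_pos (by exact_mod_cast h), if_pos h]
  · rw [if_neg (by exact_mod_cast h), if_neg h]

-- ===== VERDICT (by name: the statement is the Claim_ definition above) =====
theorem get_hourly_weather_codes_spec : Claim_equal_get_hourly_weather_codes := by
  intro hourly_data full_data _
  unfold Spec_get_hourly_weather_codes get_hourly_weather_codes get_hourly_weather_codes_alt
  rcases List.lookup "daily" full_data with _ | daily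
  · rfl
  · dsimp only
    rcases List.lookup "weathercode" daily with _ | codes
    · rfl
    · dsimp only
      exact loopA_eq_altFill codes ((List.lookup "time" hourly_data).getD []).length
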